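-- pv_equiv track=rewrite | github.com/JacobWhite-dev/bespoke-fractals | kaleidoscope.py | check_solns2
-- ===== SOURCE A (Python) =====
-- def check_solns2(s, sigma, nu, N):
--
--     for x in range(-nu + 1, nu):
--         for y in range(-s + 1, s):
--             if x == 0 and y == 0:
--                 continue
--
--             if (nu * y + x) >= N or (nu * y + x) <= -N:
--                 continue
--
--             if (s * x + sigma * y) % N == 0:
--                     return True
--
--     return False
-- ===== SOURCE B (Python) =====
-- def _egcd(a, b):
--     # extended gcd for 0 <= a, 1 <= b: returns (g, u, v) with a*u + b*v = g = gcd(a, b)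
--     if a <= 0:
--         return (b, 0, 1)
--     g, x, y = _egcd(b % a, a)
--     return (g, y - (b // a) * x, x)
--
--
-- def check_solns2(s, sigma, nu, N):
--     if N <= 0:
--         return False
--     if nu <= 0:
--         return False        # the x-range (-nu, nu) contains no lattice point
--     g, u, _ = _egcd(s % N, N)   # g = gcd(s, N) >= 1, s*u ≡ g (mod N)
--     m = N // g
--     for y in range(-s + 1, s):
--         if (sigma * y) % g != 0:
--             continue            # s*x ≡ -sigma*y (mod N) has no solution
--         x0 = (u * (-(sigma * y) // g)) % m   # solutions are x ≡ x0 (mod m)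
--         lo = max(-nu + 1, -N + 1 - nu * y)
--         hi = min(nu - 1, N - 1 - nu * y)
--         x1 = lo + ((x0 - lo) % m)            # least solution >= lo
--         if x1 > hi:
--             continue
--         if y != 0 or x1 != 0:
--             return True
--         if x1 + m <= hi:                     # y == 0: skip the origin, try next solution
--             return True
--     return False
-- ===== Notes on version B (the rewrite author's own statement) =====
-- stated objective: faster
-- what changed: B replaces A's brute-force scan of the whole (x, y) grid by one extended-gcd computation and, per y, an O(1) test of whether the residue class of solutions of s*x ≡ -sigma*y (mod N) meets the allowed x-interval.
import Mathlib
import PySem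

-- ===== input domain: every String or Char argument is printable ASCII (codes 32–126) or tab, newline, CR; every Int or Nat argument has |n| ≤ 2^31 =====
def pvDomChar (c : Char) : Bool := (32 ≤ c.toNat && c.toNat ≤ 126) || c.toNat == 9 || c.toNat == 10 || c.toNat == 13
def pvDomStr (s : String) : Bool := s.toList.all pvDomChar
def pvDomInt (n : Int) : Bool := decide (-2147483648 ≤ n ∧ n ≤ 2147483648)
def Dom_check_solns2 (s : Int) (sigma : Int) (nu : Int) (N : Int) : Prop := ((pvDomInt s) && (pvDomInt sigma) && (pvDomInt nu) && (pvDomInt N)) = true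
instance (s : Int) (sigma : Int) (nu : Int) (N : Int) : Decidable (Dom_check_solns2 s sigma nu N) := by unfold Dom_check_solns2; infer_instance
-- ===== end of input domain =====

-- B replaces A's O(s·nu) scan over the whole (x, y) grid by solving, once via extended gcd,
-- the linear congruence s·x ≡ -σ·y (mod N) and testing per y whether its arithmetic
-- progression of solutions meets the allowed x-interval (objective: faster).

-- ===== PORT A =====
def check_solns2 (s : Int) (sigma : Int) (nu : Int) (N : Int) : Bool :=
  (PySem.List.pyRange (-nu + 1) nu).any (fun x =>
    (PySem.List.pyRange (-s + 1) s).any (fun y =>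
      if x = 0 ∧ y = 0 then false
      else if nu * y + x ≥ N ∨ nu * y + x ≤ -N then false
      else PySem.Int.mod (s * x + sigma * y) N == 0))

-- ===== PORT B =====
-- extended gcd from Source B: for 0 ≤ a, 1 ≤ b returns (g, u, v) with a*u + b*v = g = gcd(a, b)
def egcdL (a b : Int) : Int × Int × Int :=
  if a ≤ 0 then (b, 0, 1)
  else
    let r := egcdL (PySem.Int.mod b a) a
    (r.1, r.2.2 - PySem.Int.floordiv b a * r.2.1, r.2.1)
termination_by a.toNat
decreasing_by
  have h2 := PySem.Int.mod_lt b (show (0:Int) < a by omega)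
  omega

-- loop body of Source B's `for y in range(-s + 1, s)` (g, u, m are loop-invariant)
def bHit (g u m sigma nu N y : Int) : Bool :=
  if PySem.Int.mod (sigma * y) g ≠ 0 then false
  else
    let x0 := PySem.Int.mod (u * PySem.Int.floordiv (-(sigma * y)) g) m
    let lo := max (-nu + 1) (-N + 1 - nu * y)
    let hi := min (nu - 1) (N - 1 - nu * y)
    let x1 := lo + PySem.Int.mod (x0 - lo) m
    if x1 > hi then false
    else if y ≠ 0 ∨ x1 ≠ 0 then true
    else decide (x1 + m ≤ hi)

def check_solns2_alt (s : Int) (sigma : Int) (nu : Int) (N : Int) : Bool :=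
  if N ≤ 0 then false
  else if nu ≤ 0 then false
  else
    let e := egcdL (PySem.Int.mod s N) N
    (PySem.List.pyRange (-s + 1) s).any (bHit e.1 e.2.1 (PySem.Int.floordiv N e.1) sigma nu N)

-- ===== PRECONDITION & SPEC =====
def Spec_check_solns2 (s : Int) (sigma : Int) (nu : Int) (N : Int) (out : Bool) : Prop := out = check_solns2_alt s sigma nu N
instance (s : Int) (sigma : Int) (nu : Int) (N : Int) (out : Bool) : Decidable (Spec_check_solns2 s sigma nu N out) := by unfold Spec_check_solns2; infer_instance

-- ===== CLAIM (what is proved, stated in full; the proofs are below) =====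
def Claim_equal_check_solns2 : Prop := ∀ (s : Int) (sigma : Int) (nu : Int) (N : Int), Dom_check_solns2 s sigma nu N → Spec_check_solns2 s sigma nu N (check_solns2 s sigma nu N)

-- ===== LEMMAS AND PROOFS =====

theorem egcdL_spec (n : Nat) : ∀ (a b : Int), a.toNat ≤ n → 0 ≤ a → 0 < b →
    (egcdL a b).1 = Int.gcd a b ∧ a * (egcdL a b).2.1 + b * (egcdL a b).2.2 = (egcdL a b).1 := by
  induction n with
  | zero =>
    intro a b hn ha hb
    have ha0 : a = 0 := by omega
    rw [egcdL, if_pos (by omega)]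
    subst ha0
    refine ⟨?_, by ring⟩
    simp only [Int.gcd, Int.natAbs_zero, Nat.gcd_zero_left]; omega
  | succ n ih =>
    intro a b hn ha hb
    by_cases h0 : a ≤ 0
    · rw [egcdL, if_pos h0]
      have : a = 0 := by omega
      subst this
      refine ⟨?_, by ring⟩
      simp only [Int.gcd, Int.natAbs_zero, Nat.gcd_zero_left]; omega
    · have hapos : (0:Int) < a := by omega
      have hm1 := PySem.Int.mod_nonneg b hapos
      have hm2 := PySem.Int.mod_lt b hapos
      have := ih (PySem.Int.mod b a) a (by omega) hm1 hapos
      rw [egcdL, if_neg h0]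
      obtain ⟨hg, hbez⟩ := this
      constructor
      · simp only [hg]
        rw [PySem.Int.mod_eq_emod_of_pos hapos]
        rw [Int.gcd_emod, Int.gcd_comm]
      · have hfm := PySem.Int.floordiv_mul_add_mod b a
        simp only []
        linear_combination hbez - (egcdL (PySem.Int.mod b a) a).2.1 * hfm


-- x1 = lo + (x0 - lo) % m is a member of x0's residue class and is ≥ lo
theorem ap_mem (m lo x0 : Int) (hm : 0 < m) :
    lo ≤ lo + (x0 - lo) % m ∧ (lo + (x0 - lo) % m) % m = x0 % m := by
  have h1 := Int.emod_nonneg (x0 - lo) (show m ≠ 0 by omega)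
  refine ⟨by omega, ?_⟩
  have h2 : (x0 - lo) % m ≡ x0 - lo [ZMOD m] := Int.emod_emod_of_dvd _ dvd_rfl
  have h3 : lo + (x0 - lo) % m ≡ lo + (x0 - lo) [ZMOD m] := h2.add_left lo
  have h4 : lo + (x0 - lo) = x0 := by ring
  rw [h4] at h3
  exact h3

-- minimality of x1 among solutions ≥ lo
theorem ap_min (m lo x0 x : Int) (hm : 0 < m) (hlo : lo ≤ x) (hx : x % m = x0 % m) :
    lo + (x0 - lo) % m ≤ x := by
  obtain ⟨hmem1, hmem2⟩ := ap_mem m lo x0 hm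
  have hb : (x0 - lo) % m < m := Int.emod_lt_of_pos _ hm
  have hbn : 0 ≤ (x0 - lo) % m := Int.emod_nonneg _ (show m ≠ 0 by omega)
  have hmod : (lo + (x0 - lo) % m) % m = x % m := hmem2.trans hx.symm
  have hdvd : m ∣ x - (lo + (x0 - lo) % m) := Int.ModEq.dvd hmod
  by_contra h
  have hpos : 0 < (lo + (x0 - lo) % m) - x := by omega
  have hdvd2 : m ∣ lo + (x0 - lo) % m - x := by
    have := dvd_neg.mpr hdvd
    rwa [neg_sub] at this
  have := Int.le_of_dvd hpos hdvd2
  omega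

-- when g = gcd(s, N) does not divide c, s*x + c is never divisible by N
theorem no_sol (s N g c : Int) (hgs : g ∣ s) (hgN : g ∣ N) (hgc : ¬ g ∣ c) (x : Int) :
    ¬ N ∣ s * x + c := by
  intro h
  apply hgc
  have h1 : g ∣ s * x + c := dvd_trans hgN h
  have h2 : g ∣ s * x := hgs.mul_right x
  have : c = (s * x + c) - s * x := by ring
  rw [this]
  exact dvd_sub h1 h2

-- characterization of solutions of s*x ≡ -c (mod N) as a residue class mod m = N/g
theorem cong_char (s N g u m c : Int) (hg : 0 < g) (hmg : m * g = N)
    (hgs : g ∣ s) (hcop : Int.gcd (s / g) m = 1) (hsu : s * u ≡ g [ZMOD N]) (hgc : g ∣ c)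
    (x : Int) :
    N ∣ s * x + c ↔ x % m = (u * (-c / g)) % m := by
  set k := -c / g with hk
  have hgk : g * k = -c := by
    rw [hk, mul_comm]
    exact Int.ediv_mul_cancel (dvd_neg.mpr hgc)
  have hs' : g * (s / g) = s := by rw [mul_comm]; exact Int.ediv_mul_cancel hgs
  have hsol : N ∣ s * (u * k) + c := by
    have h1 : s * u * k ≡ g * k [ZMOD N] := hsu.mul_right k
    have h2 : s * (u * k) + c ≡ g * k + c [ZMOD N] := by
      rw [← mul_assoc]; exact h1.add_right c
    have h3 : g * k + c = 0 := by rw [hgk]; ring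
    rw [h3] at h2
    exact Int.modEq_zero_iff_dvd.mp h2
  constructor
  · intro h
    have hd : N ∣ s * (x - u * k) := by
      have he : s * (x - u * k) = (s * x + c) - (s * (u * k) + c) := by ring
      rw [he]; exact dvd_sub h hsol
    have hdv : g * m ∣ g * ((s / g) * (x - u * k)) := by
      have h5 : g * ((s / g) * (x - u * k)) = s * (x - u * k) := by
        rw [← mul_assoc, hs']
      rw [h5, mul_comm g m, hmg]
      exact hd
    have hm' : m ∣ (s / g) * (x - u * k) :=
      (mul_dvd_mul_iff_left (show (g : Int) ≠ 0 by omega)).mp hdv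
    have hco : IsCoprime (m : Int) (s / g) :=
      (Int.isCoprime_iff_gcd_eq_one.mpr hcop).symm
    have hmx : m ∣ x - u * k := hco.dvd_of_dvd_mul_left hm'
    exact (Int.ModEq.symm (Int.modEq_iff_dvd.mpr hmx))
  · intro h
    have hmx : m ∣ u * k - x := Int.modEq_iff_dvd.mp h
    have hd : N ∣ s * (u * k - x) := by
      have h5 : s * (u * k - x) = g * ((s / g) * (u * k - x)) := by
        rw [← mul_assoc, hs']
      rw [h5, ← hmg, mul_comm m g]
      exact mul_dvd_mul_left g (Dvd.dvd.mul_left hmx (s / g))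
    have he : s * x + c = (s * (u * k) + c) - s * (u * k - x) := by ring
    rw [he]
    exact dvd_sub hsol hd


-- A = true iff some admissible lattice point exists (stated with the y-quantifier outermost)
theorem A_iff (s sigma nu N : Int) :
    check_solns2 s sigma nu N = true ↔
      ∃ y, (-s + 1 ≤ y ∧ y < s) ∧ ∃ x, (-nu + 1 ≤ x ∧ x < nu) ∧ ¬(x = 0 ∧ y = 0) ∧
        ¬(nu * y + x ≥ N ∨ nu * y + x ≤ -N) ∧ N ∣ s * x + sigma * y := by
  simp only [check_solns2, List.any_eq_true, PySem.List.mem_pyRange_one]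
  constructor
  · rintro ⟨x, hx, y, hy, hp⟩
    refine ⟨y, hy, x, hx, ?_⟩
    split_ifs at hp with h1 h2
    exact ⟨h1, h2, (PySem.Int.mod_eq_zero_iff_dvd _ _).mp (by simpa using hp)⟩
  · rintro ⟨y, hy, x, hx, h1, h2, h3⟩
    refine ⟨x, hx, y, hy, ?_⟩
    rw [if_neg h1, if_neg h2]
    simpa using (PySem.Int.mod_eq_zero_iff_dvd _ _).mpr h3

-- Source B's loop body decides precisely whether row y contains an admissible lattice point
theorem bHit_iff (s sigma nu N g u m y : Int) (hgpos : 0 < g)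
    (hmpos : 0 < m) (hmg : m * g = N) (hgs : g ∣ s) (hgN : g ∣ N)
    (hcop : Int.gcd (s / g) m = 1) (hsu : s * u ≡ g [ZMOD N]) :
    bHit g u m sigma nu N y = true ↔
      ∃ x, (-nu + 1 ≤ x ∧ x < nu) ∧ ¬(x = 0 ∧ y = 0) ∧
        ¬(nu * y + x ≥ N ∨ nu * y + x ≤ -N) ∧ N ∣ s * x + sigma * y := by
  rw [bHit]
  by_cases hdvd : g ∣ sigma * y
  · have hz : PySem.Int.mod (sigma * y) g = 0 := (PySem.Int.mod_eq_zero_iff_dvd _ _).mpr hdvd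
    rw [if_neg (by simp [hz])]
    dsimp only
    simp only [PySem.Int.mod_eq_emod_of_pos hmpos, PySem.Int.floordiv_eq_ediv_of_pos hgpos]
    set k := -(sigma * y) / g with hk
    set x0 := u * k % m with hx0
    set lo := max (-nu + 1) (-N + 1 - nu * y) with hlo
    set hi := min (nu - 1) (N - 1 - nu * y) with hhi
    have hchar := cong_char s N g u m (sigma * y) hgpos hmg hgs hcop hsu hdvd
    have hx0m : x0 % m = u * k % m := Int.emod_emod_of_dvd _ dvd_rfl
    have hbig : ∀ x : Int,
        ((-nu + 1 ≤ x ∧ x < nu) ∧ ¬(x = 0 ∧ y = 0) ∧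
          ¬(nu * y + x ≥ N ∨ nu * y + x ≤ -N) ∧ N ∣ s * x + sigma * y) ↔
        (lo ≤ x ∧ x ≤ hi ∧ ¬(x = 0 ∧ y = 0) ∧ x % m = x0 % m) := by
      intro x
      rw [hchar x, ← hk, ← hx0m]
      constructor
      · rintro ⟨h1, h2, h3, h4⟩
        exact ⟨by omega, by omega, h2, h4⟩
      · rintro ⟨h1, h2, h3, h4⟩
        exact ⟨by omega, h3, by omega, h4⟩
    obtain ⟨hmem1, hmem2⟩ := ap_mem m lo x0 hmpos
    by_cases hy : y = 0
    · split_ifs with h1 h2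
      · simp only [false_iff]
        rintro ⟨x, hx⟩
        rw [hbig x] at hx
        have := ap_min m lo x0 x hmpos hx.1 hx.2.2.2
        omega
      · simp only [true_iff]
        have hx1 : lo + (x0 - lo) % m ≠ 0 := by tauto
        refine ⟨lo + (x0 - lo) % m, ?_⟩
        rw [hbig]
        exact ⟨hmem1, by omega, by tauto, hmem2⟩
      · simp only [decide_eq_true_eq]
        have hx1 : lo + (x0 - lo) % m = 0 := by tauto
        constructor
        · intro h
          refine ⟨lo + (x0 - lo) % m + m, ?_⟩
          rw [hbig]
          refine ⟨by omega, by omega, by rintro ⟨hc1, hc2⟩; omega, ?_⟩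
          have h6 : (lo + (x0 - lo) % m + m) % m = (lo + (x0 - lo) % m) % m := by
            simp
          exact h6.trans hmem2
        · rintro ⟨x, hx⟩
          rw [hbig x] at hx
          obtain ⟨hb1, hb2, hb3, hb4⟩ := hx
          have hxne : x ≠ 0 := by tauto
          have hmin := ap_min m lo x0 x hmpos hb1 hb4
          have hdvd2 : m ∣ x - (lo + (x0 - lo) % m) := Int.ModEq.dvd (hmem2.trans hb4.symm)
          have := Int.le_of_dvd (show 0 < x - (lo + (x0 - lo) % m) by omega) hdvd2
          omega
    · split_ifs with h1 h2
      · simp only [false_iff]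
        rintro ⟨x, hx⟩
        rw [hbig x] at hx
        have := ap_min m lo x0 x hmpos hx.1 hx.2.2.2
        omega
      · simp only [true_iff]
        refine ⟨lo + (x0 - lo) % m, ?_⟩
        rw [hbig]
        exact ⟨hmem1, by omega, by tauto, hmem2⟩
      · exact absurd (Or.inl hy) h2
  · rw [if_pos (by simpa [PySem.Int.mod_eq_zero_iff_dvd] using hdvd)]
    simp only [Bool.false_eq_true, false_iff]
    rintro ⟨x, _, _, _, hdv⟩
    exact no_sol s N g (sigma * y) hgs hgN hdvd x hdv

theorem check_solns2_eq (s sigma nu N : Int) :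
    check_solns2 s sigma nu N = check_solns2_alt s sigma nu N := by
  by_cases hN : N ≤ 0
  · rw [check_solns2_alt, if_pos hN, check_solns2]
    simp only [List.any_eq_false]
    intro x hx
    simp only [List.any_eq_true, not_exists]
    intro y hc
    obtain ⟨hy, hp⟩ := hc
    split_ifs at hp with h1 h2
    omega
  · by_cases hnu : nu ≤ 0
    · rw [check_solns2_alt, if_neg hN, if_pos hnu, check_solns2]
      simp only [List.any_eq_false]
      intro x hx
      rw [PySem.List.mem_pyRange_one] at hx
      exfalso; omega
    have hN' : (0:Int) < N := by omega
    have ha0 : (0:Int) ≤ PySem.Int.mod s N := PySem.Int.mod_nonneg s hN'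
    obtain ⟨hg, hbez⟩ := egcdL_spec (PySem.Int.mod s N).toNat (PySem.Int.mod s N) N le_rfl ha0 hN'
    set g := (egcdL (PySem.Int.mod s N) N).1 with hge
    set u := (egcdL (PySem.Int.mod s N) N).2.1 with hue
    set v := (egcdL (PySem.Int.mod s N) N).2.2 with hve
    have hgcd : g = ↑(Int.gcd s N) := by
      rw [hg, PySem.Int.mod_eq_emod_of_pos hN', Int.gcd_emod]
    have hgcdpos : 0 < Int.gcd s N := Int.gcd_pos_iff.mpr (Or.inr (by omega))
    have hgpos : 0 < g := by rw [hgcd]; exact_mod_cast hgcdpos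
    have hgs : g ∣ s := by rw [hgcd]; exact Int.gcd_dvd_left s N
    have hgN : g ∣ N := by rw [hgcd]; exact Int.gcd_dvd_right s N
    set m := PySem.Int.floordiv N g with hme
    have hmed : m = N / g := PySem.Int.floordiv_eq_ediv_of_pos hgpos
    have hmg : m * g = N := by rw [hmed]; exact Int.ediv_mul_cancel hgN
    have hmpos : 0 < m := by nlinarith
    have hcop : Int.gcd (s / g) m = 1 := by
      rw [hmed, hgcd]; exact Int.gcd_div_gcd_div_gcd hgcdpos
    have hsu : s * u ≡ g [ZMOD N] := by
      have hsa : s ≡ PySem.Int.mod s N [ZMOD N] := by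
        rw [PySem.Int.mod_eq_emod_of_pos hN']
        exact (Int.emod_emod_of_dvd s dvd_rfl).symm
      have h1 : s * u ≡ PySem.Int.mod s N * u [ZMOD N] := hsa.mul_right u
      have h2 : PySem.Int.mod s N * u ≡ g [ZMOD N] := by
        rw [Int.modEq_iff_dvd]
        exact ⟨v, by linear_combination -hbez⟩
      exact h1.trans h2
    rw [check_solns2_alt, if_neg hN, if_neg hnu]
    apply Bool.coe_iff_coe.mp
    rw [A_iff]
    simp only [List.any_eq_true, PySem.List.mem_pyRange_one]
    exact exists_congr fun y => and_congr_right fun _ =>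
      (bHit_iff s sigma nu N g u m y hgpos hmpos hmg hgs hgN hcop hsu).symm

-- ===== VERDICT (by name: the statement is the Claim_ definition above) =====
theorem check_solns2_spec : Claim_equal_check_solns2 := by
  intro s sigma nu N _
  unfold Spec_check_solns2
  exact check_solns2_eq s sigma nu N
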